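-- pv_equiv track=rewrite | github.com/Liujia127/PLC-Transition-Sequence | shiyan/repeatable_segments.py | find_repeatable_segment2
-- ===== SOURCE A (Python) =====
-- def find_repeatable_segment2(text, string):
--     n = len(text)
--     max_length = 0
--     repeatable_segment = []
--
--     for window_size in range(2, n // 2 + 1):
--         for start in range(n - window_size + 1):
--             segment = text[start:start + window_size]
--             repeats = []
--
--             for i in range(start + window_size, n - window_size + 1):
--                 if segment == text[i:i + window_size]:
--                     repeats.append(segment)
--
--             if len(repeats) > 0:
--                 if window_size > max_length and segment.startswith(string):
--                     max_length = window_size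
--                     repeatable_segment = [segment]
--                 elif window_size == max_length and segment.startswith(string):
--                     repeatable_segment.append(segment)
--
--     return repeatable_segment
-- ===== SOURCE B (Python) =====
-- def find_repeatable_segment2(text, string):
--     # For each window size from largest to smallest, index the last occurrence of
--     # every substring in one pass; a segment "repeats" iff its last occurrence
--     # starts at or beyond start + window. Return at the first (largest) size hit.
--     n = len(text)
--     for w in range(n // 2, 1, -1):
--         last = {}
--         for s in range(n - w + 1):
--             last[text[s:s + w]] = s
--         hits = []
--         for s in range(n - w + 1):
--             seg = text[s:s + w]
--             if seg.startswith(string) and last.get(seg, -1) >= s + w: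
--                 hits.append(seg)
--         if hits:
--             return hits
--     return []
-- ===== Notes on version B (the rewrite author's own statement) =====
-- stated objective: faster
-- what changed: Instead of A's ascending window sizes with max-tracking and an O(n) rescan per (window,start) pair, B scans window sizes from largest to smallest, builds per window a hash map from each substring to its last start position in one pass, decides 'repeats' by comparing that last position with start+window, and returns at the first window size that yields hits.
import Mathlib
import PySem

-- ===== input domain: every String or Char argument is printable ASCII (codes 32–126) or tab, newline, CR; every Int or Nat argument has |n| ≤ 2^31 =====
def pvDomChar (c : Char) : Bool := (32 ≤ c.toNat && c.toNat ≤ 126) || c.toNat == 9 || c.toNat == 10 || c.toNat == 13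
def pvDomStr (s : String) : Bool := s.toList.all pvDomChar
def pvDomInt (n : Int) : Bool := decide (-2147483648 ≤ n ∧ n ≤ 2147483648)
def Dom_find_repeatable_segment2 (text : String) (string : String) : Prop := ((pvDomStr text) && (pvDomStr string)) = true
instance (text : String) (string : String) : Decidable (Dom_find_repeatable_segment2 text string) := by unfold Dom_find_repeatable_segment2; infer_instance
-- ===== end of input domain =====

-- B replaces A's ascending window sizes + max tracking + O(n) rescan per (window,start)
-- by descending window sizes with early return and a per-window dict of last occurrences
-- (objective: faster, measured). Return-value equivalence is proved on all inputs.

-- ===== PORT A =====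
-- repeats = [segment for i in range(start+w, n-w+1) if segment == text[i:i+w]]
def aRepeats (t : List Char) (n w start : Int) (segment : List Char) : List (List Char) :=
  (PySem.List.pyRange (start + w) (n - w + 1)).foldl
    (fun r i => if segment == PySem.List.slice t (some i) (some (i + w)) then r ++ [segment] else r) []

-- body of A's `for start in range(n - window_size + 1)` loop, updating (max_length, repeatable_segment)
def aStart (t p : List Char) (n w : Int) (st : Int × List (List Char)) (start : Int) :
    Int × List (List Char) :=
  let segment := PySem.List.slice t (some start) (some (start + w))
  let repeats := aRepeats t n w start segment
  if 0 < repeats.length then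
    if st.1 < w ∧ PySem.Chars.startswith segment p = true then (w, [segment])
    else if w = st.1 ∧ PySem.Chars.startswith segment p = true then (st.1, st.2 ++ [segment])
    else st
  else st

-- body of A's `for window_size in range(2, n // 2 + 1)` loop
def aWindow (t p : List Char) (n : Int) (st : Int × List (List Char)) (w : Int) :
    Int × List (List Char) :=
  (PySem.List.pyRange 0 (n - w + 1)).foldl (aStart t p n w) st

def find_repeatable_segment2 (text : String) (string : String) : List String :=
  let t := text.toList
  let p := string.toList
  let n : Int := PySem.Chars.len t
  ((PySem.List.pyRange 2 (PySem.Int.floordiv n 2 + 1)).foldl (aWindow t p n) (0, [])).2.map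
    String.ofList

-- ===== PORT B =====
-- one window size: build dict substring -> last start, then collect the hits in start order
def bSegHits (t p : List Char) (n w : Int) : List (List Char) :=
  let last : PySem.Dict (List Char) Int :=
    (PySem.List.pyRange 0 (n - w + 1)).foldl
      (fun d s => d.insert (PySem.List.slice t (some s) (some (s + w))) s) PySem.Dict.empty
  (PySem.List.pyRange 0 (n - w + 1)).foldl
    (fun hits s =>
      let seg := PySem.List.slice t (some s) (some (s + w))
      if PySem.Chars.startswith seg p && decide (s + w ≤ last.getD seg (-1))
      then hits ++ [seg] else hits) []

-- `for w in range(n//2, 1, -1): ... if hits: return hits` / `return []`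
def bLoop (t p : List Char) (n : Int) : List Int → List (List Char)
  | [] => []
  | w :: rest =>
    let hits := bSegHits t p n w
    if hits = [] then bLoop t p n rest else hits

def find_repeatable_segment2_alt (text : String) (string : String) : List String :=
  let t := text.toList
  let p := string.toList
  let n : Int := PySem.Chars.len t
  (bLoop t p n (PySem.List.pyRange (PySem.Int.floordiv n 2) 1 (-1))).map String.ofList

-- ===== PRECONDITION & SPEC =====
def Spec_find_repeatable_segment2 (text : String) (string : String) (out : List String) : Prop := out = find_repeatable_segment2_alt text string
instance (text : String) (string : String) (out : List String) : Decidable (Spec_find_repeatable_segment2 text string out) := by unfold Spec_find_repeatable_segment2; infer_instance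

-- ===== CLAIM (what is proved, stated in full; the proofs are below) =====
def Claim_equal_find_repeatable_segment2 : Prop := ∀ (text : String) (string : String), Dom_find_repeatable_segment2 text string → Spec_find_repeatable_segment2 text string (find_repeatable_segment2 text string)

-- ===== LEMMAS AND PROOFS =====

-- the substring text[s:s+w] on the list side
def subseg (t : List Char) (w s : Nat) : List Char := (t.drop s).take w

-- the canonical per-(window,start) condition both programs test
def qual (t p : List Char) (w s : Nat) : Bool :=
  PySem.Chars.startswith (subseg t w s) p &&
    decide (∃ i < t.length + 1 - w, s + w ≤ i ∧ subseg t w i = subseg t w s)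

-- the hits among the first j start positions / among all of them
def hitsUpto (t p : List Char) (w j : Nat) : List (List Char) :=
  ((List.range j).filter (qual t p w)).map (subseg t w)

def hitsC (t p : List Char) (w : Nat) : List (List Char) :=
  hitsUpto t p w (t.length + 1 - w)

-- last i < k with p i
def lastHit (p : Nat → Bool) : Nat → Option Nat
  | 0 => none
  | (k+1) => if p k then some k else lastHit p k

-- window sizes K, K-1, ..., 2
def descWs : Nat → List Nat
  | 0 => []
  | 1 => []
  | (k+2) => (k+2) :: descWs (k+1)

-- A's running max_length after windows 2..k
def bestM (t p : List Char) : Nat → Nat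
  | 0 => 0
  | 1 => 0
  | (k+2) => if hitsC t p (k+2) = [] then bestM t p (k+1) else (k+2)

-- hits of the first window size (descending) that has any
def firstHitsC (t p : List Char) : List Nat → List (List Char)
  | [] => []
  | w :: rest => if hitsC t p w = [] then firstHitsC t p rest else hitsC t p w


-- text[j:j+w] as a slice equals subseg
lemma slice_sub (t : List Char) (w j : Nat) :
    PySem.List.slice t (some (j : Int)) (some ((j : Int) + (w : Int))) = subseg t w j := by
  rw [show ((j : Int) + (w : Int)) = ((j + w : Nat) : Int) by push_cast; ring,
    PySem.List.slice_natCast]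
  simp [subseg]

-- A's inner rescan finds a later occurrence iff one exists
lemma aRepeats_pos (t : List Char) (w s : Nat) (hw : w ≤ t.length) :
    0 < (aRepeats t (t.length : Int) (w : Int) (s : Int) (subseg t w s)).length ↔
      (∃ i < t.length + 1 - w, s + w ≤ i ∧ subseg t w i = subseg t w s) := by
  unfold aRepeats
  rw [show ((s : Int) + (w : Int)) = ((s + w : Nat) : Int) by push_cast; ring,
    show ((t.length : Int) - (w : Int) + 1) = ((t.length + 1 - w : Nat) : Int) by omega,
    PySem.List.foldl_append_if]
  simp only [List.nil_append, List.length_map, List.length_pos_iff, ne_eq,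
    List.filter_eq_nil_iff, not_forall]
  constructor
  · intro ⟨x, hx, hpx⟩
    have hmem := PySem.List.mem_pyRange_one.mp hx
    have hx0 : 0 ≤ x := le_trans (by positivity) hmem.1
    refine ⟨x.toNat, by omega, by omega, ?_⟩
    have hxx : x = ((x.toNat : Nat) : Int) := by omega
    rw [hxx, slice_sub] at hpx
    exact ((beq_iff_eq).mp (by simpa using hpx)).symm
  · intro ⟨i, hi, hsi, heq⟩
    refine ⟨(i : Int), PySem.List.mem_pyRange_one.mpr ⟨by exact_mod_cast hsi, by exact_mod_cast hi⟩, ?_⟩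
    rw [slice_sub]
    simp [heq]


lemma hitsUpto_succ (t p : List Char) (w j : Nat) :
    hitsUpto t p w (j + 1) =
      hitsUpto t p w j ++ (if qual t p w j then [subseg t w j] else []) := by
  unfold hitsUpto
  rw [List.range_succ, List.filter_append, List.map_append]
  congr 1
  by_cases h : qual t p w j <;> simp [h]

-- one start-step of A
lemma aStart_compute (t p : List Char) (w j : Nat) (hw : w ≤ t.length)
    (st : Int × List (List Char)) :
    aStart t p (t.length : Int) (w : Int) st (j : Int) =
      if qual t p w j then
        (if st.1 < (w : Int) then ((w : Int), [subseg t w j])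
         else if (w : Int) = st.1 then (st.1, st.2 ++ [subseg t w j]) else st)
      else st := by
  unfold aStart
  rw [slice_sub]
  by_cases hex : ∃ i < t.length + 1 - w, j + w ≤ i ∧ subseg t w i = subseg t w j
  · rw [if_pos ((aRepeats_pos t w j hw).mpr hex)]
    by_cases hsw : PySem.Chars.startswith (subseg t w j) p = true
    · have hq : qual t p w j = true := by
        simp [qual, hsw, hex]
      rw [if_pos hq]
      by_cases h1 : st.1 < (w : Int)
      · rw [if_pos ⟨h1, hsw⟩, if_pos h1]
      · rw [if_neg (fun h => h1 h.1), if_neg h1]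
        by_cases h2 : (w : Int) = st.1
        · rw [if_pos ⟨h2, hsw⟩, if_pos h2]
        · rw [if_neg (fun h => h2 h.1), if_neg h2]
    · have hq : qual t p w j = false := by
        simp [qual, hsw]
      rw [if_neg (fun h => hsw h.2), if_neg (fun h => hsw h.2)]
      simp [hq]
  · rw [if_neg (by
      intro hpos
      exact hex ((aRepeats_pos t w j hw).mp hpos))]
    have hq : qual t p w j = false := by
      simp only [qual, Bool.and_eq_false_iff]
      right
      simpa using hex
    simp [hq]

-- A's start loop at window w: leaves the state alone or replaces it by (w, hits w)
lemma aStart_fold (t p : List Char) (w M : Nat) (L : List (List Char))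
    (hM : M < w) (hw : w ≤ t.length) :
    ∀ j, ((List.range j).map (fun i : Nat => (i : Int))).foldl (aStart t p (t.length : Int) (w : Int))
        ((M : Int), L) =
      if hitsUpto t p w j = [] then ((M : Int), L) else ((w : Int), hitsUpto t p w j) := by
  intro j
  induction j with
  | zero => simp [hitsUpto]
  | succ j ih =>
    rw [List.range_succ, List.map_append, List.foldl_append, ih]
    simp only [List.map_cons, List.map_nil, List.foldl_cons, List.foldl_nil]
    rw [aStart_compute t p w j hw, hitsUpto_succ]
    by_cases hq : qual t p w j = true
    · rw [if_pos hq]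
      by_cases hemp : hitsUpto t p w j = []
      · rw [if_pos hemp, if_pos (show ((M : Int), L).1 < (w : Int) from by simp; exact_mod_cast hM)]
        simp [hq, hemp]
      · rw [if_neg hemp]
        have : ¬ (((w : Int), hitsUpto t p w j).1 < (w : Int)) := by simp
        rw [if_neg this, if_pos rfl]
        simp [hq, hemp]
    · rw [if_neg hq]
      simp only [Bool.not_eq_true] at hq
      simp [hq]

lemma aWindow_eq (t p : List Char) (w M : Nat) (L : List (List Char))
    (hM : M < w) (hw : w ≤ t.length) :
    aWindow t p (t.length : Int) ((M : Int), L) (w : Int) =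
      if hitsC t p w = [] then ((M : Int), L) else ((w : Int), hitsC t p w) := by
  unfold aWindow
  rw [show ((t.length : Int) - (w : Int) + 1) = ((t.length + 1 - w : Nat) : Int) by omega,
    PySem.List.pyRange_zero_natCast]
  exact aStart_fold t p w M L hM hw _

lemma bestM_le (t p : List Char) : ∀ k, bestM t p k ≤ k := by
  intro k
  induction k with
  | zero => simp [bestM]
  | succ k ih =>
    match k, ih with
    | 0, _ => simp [bestM]
    | (k + 1), ih =>
      rw [bestM]
      split
      · omega
      · omega

-- A's window loop over 2..k computes (bestM k, hits of the best window)
lemma A_outer (t p : List Char) : ∀ k, k ≤ t.length / 2 →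
    (PySem.List.pyRange 2 ((k : Int) + 1)).foldl (aWindow t p (t.length : Int)) (0, []) =
      ((bestM t p k : Int), firstHitsC t p (descWs k)) := by
  intro k
  induction k with
  | zero =>
    intro _
    rw [show ((0 : Nat) : Int) + 1 = 1 by norm_num,
      PySem.List.pyRange_of_pos 2 1 (by norm_num)]
    simp [bestM, descWs, firstHitsC]
  | succ k ih =>
    intro hk
    match k, ih with
    | 0, _ =>
      rw [show ((1 : Nat) : Int) + 1 = 2 by norm_num,
        PySem.List.pyRange_of_pos 2 2 (by norm_num)]
      simp [bestM, descWs, firstHitsC]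
    | (k + 1), ih =>
      have hk' : k + 1 ≤ t.length / 2 := by omega
      have hwle : k + 2 ≤ t.length := by
        have := Nat.div_le_self t.length 2
        omega
      rw [show (((k + 2 : Nat) : Int) + 1) = ((k + 2 : Nat) : Int) + 1 from rfl,
        PySem.List.pyRange_one_append 2 (((k + 1 : Nat) : Int) + 1) (((k + 2 : Nat) : Int) + 1)
          (by push_cast; omega) (by omega),
        List.foldl_append, ih hk']
      have hsingle : PySem.List.pyRange (((k + 1 : Nat) : Int) + 1) (((k + 2 : Nat) : Int) + 1) =
          [((k + 2 : Nat) : Int)] := by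
        rw [PySem.List.pyRange_one_cons (by push_cast; omega),
          PySem.List.pyRange_of_pos _ _ (by norm_num : (0:Int) < 1)]
        rw [if_neg (by push_cast; omega)]
        simp
        ring
      rw [hsingle]
      simp only [List.foldl_cons, List.foldl_nil]
      have hM : bestM t p (k + 1) < k + 2 := by
        have := bestM_le t p (k + 1)
        omega
      rw [aWindow_eq t p (k + 2) (bestM t p (k + 1)) _ hM hwle]
      rw [show descWs (k + 2) = (k + 2) :: descWs (k + 1) from rfl,
        show bestM t p (k + 2) = if hitsC t p (k + 2) = [] then bestM t p (k + 1) else (k + 2) from rfl,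
        firstHitsC]
      by_cases h : hitsC t p (k + 2) = [] <;> simp [h]

-- the dict built by B holds, for each key, the LAST start position with that substring
lemma dict_getD (t : List Char) (w : Nat) (key : List Char) :
    ∀ (m : Nat) (d : PySem.Dict (List Char) Int),
      (((List.range m).map (fun i : Nat => (i : Int))).foldl
          (fun d s => d.insert (PySem.List.slice t (some s) (some (s + (w : Int)))) s) d).getD
          key (-1) =
        (match lastHit (fun i => subseg t w i == key) m with
         | some x => (x : Int)
         | none => d.getD key (-1)) := by
  intro m
  induction m with
  | zero => intro d; simp [lastHit]
  | succ m ih =>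
    intro d
    rw [List.range_succ, List.map_append, List.foldl_append]
    simp only [List.map_cons, List.map_nil, List.foldl_cons, List.foldl_nil]
    rw [PySem.Dict.getD_insert, slice_sub t w m, lastHit]
    by_cases h : subseg t w m == key
    · rw [if_pos ((beq_iff_eq).mp h).symm, if_pos h]
    · rw [if_neg (fun he => h ((beq_iff_eq).mpr he.symm)), if_neg h, ih d]

lemma lastHit_le (q : Nat → Bool) (c : Nat) :
    ∀ m, ((c : Int) ≤ match lastHit q m with | some x => (x : Int) | none => -1) ↔
      ∃ i < m, c ≤ i ∧ q i = true := by
  intro m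
  induction m with
  | zero => simp [lastHit]; omega
  | succ m ih =>
    rw [lastHit]
    by_cases h : q m
    · simp only [h, if_pos]
      constructor
      · intro hc
        exact ⟨m, by omega, by exact_mod_cast hc, h⟩
      · intro ⟨i, hi, hci, hqi⟩
        exact_mod_cast by omega
    · simp only [h, if_neg, Bool.false_eq_true, not_false_iff]
      rw [ih]
      constructor
      · intro ⟨i, hi, hci, hqi⟩
        exact ⟨i, by omega, hci, hqi⟩
      · intro ⟨i, hi, hci, hqi⟩
        refine ⟨i, ?_, hci, hqi⟩
        rcases Nat.lt_succ_iff_lt_or_eq.mp hi with h' | h'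
        · exact h'
        · subst h'
          simp [hqi] at h

-- B's per-window hits coincide with the canonical hits
lemma bSegHits_eq (t p : List Char) (w : Nat) (_hw2 : 2 ≤ w) (hw : w ≤ t.length) :
    bSegHits t p (t.length : Int) (w : Int) = hitsC t p w := by
  unfold bSegHits
  rw [show ((t.length : Int) - (w : Int) + 1) = ((t.length + 1 - w : Nat) : Int) by omega,
    PySem.List.pyRange_zero_natCast, PySem.List.foldl_append_if, List.nil_append,
    List.filter_map, List.map_map]
  unfold hitsC hitsUpto
  refine Eq.trans (congrArg _ (List.filter_congr ?_)) (List.map_congr_left ?_)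
  · intro i _
    simp only [Function.comp_apply]
    rw [slice_sub t w i,
      dict_getD t w (subseg t w i) (t.length + 1 - w) PySem.Dict.empty]
    unfold qual
    congr 1
    rw [decide_eq_decide]
    have hcast : ((i : Int) + (w : Int)) = ((i + w : Nat) : Int) := by push_cast; ring
    rw [hcast]
    have := lastHit_le (fun i' => subseg t w i' == subseg t w i) (i + w) (t.length + 1 - w)
    simp only [PySem.Dict.getD_empty] at *
    rw [this]
    simp only [beq_iff_eq]
  · intro i _
    simp only [Function.comp_apply]
    exact slice_sub t w i

lemma bRange_desc : ∀ K : Nat, PySem.List.pyRange (K : Int) 1 (-1) = (descWs K).map (fun i : Nat => (i : Int)) := by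
  intro K
  induction K with
  | zero =>
    rw [PySem.List.pyRange_of_neg _ _ (by norm_num : (-1 : Int) < 0)]
    simp [descWs]
  | succ K ih =>
    match K, ih with
    | 0, _ =>
      rw [PySem.List.pyRange_of_neg _ _ (by norm_num : (-1 : Int) < 0)]
      simp [descWs]
    | (K + 1), ih =>
      have hstep : ∀ K : Nat, PySem.List.pyRange ((K + 2 : Nat) : Int) 1 (-1) =
          ((K + 2 : Nat) : Int) :: PySem.List.pyRange ((K + 1 : Nat) : Int) 1 (-1) := by
        intro K
        rw [PySem.List.pyRange_of_neg _ _ (by norm_num : (-1 : Int) < 0),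
          PySem.List.pyRange_of_neg _ _ (by norm_num : (-1 : Int) < 0)]
        rw [if_pos (by push_cast; omega)]
        rw [show ((((K + 2 : Nat) : Int) - 1 + - -1 - 1) / - -1).toNat = K + 1 by
          push_cast; norm_num; try omega]
        by_cases hK : 0 < K
        · rw [if_pos (by push_cast; omega)]
          rw [show ((((K + 1 : Nat) : Int) - 1 + - -1 - 1) / - -1).toNat = K by
            push_cast; norm_num; try omega]
          rw [List.range_succ_eq_map, List.map_cons, List.map_map]
          congr 1
          refine List.map_congr_left (fun j _ => ?_)
          simp only [Function.comp_apply, Nat.succ_eq_add_one]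
          push_cast
          ring
        · have hK0 : K = 0 := by omega
          subst hK0
          norm_num
      rw [hstep K, ih]
      rw [show descWs (K + 2) = (K + 2) :: descWs (K + 1) from rfl, List.map_cons]

lemma descWs_mem : ∀ K w, w ∈ descWs K → 2 ≤ w ∧ w ≤ K := by
  intro K
  induction K with
  | zero => simp [descWs]
  | succ K ih =>
    match K, ih with
    | 0, _ => simp [descWs]
    | (K + 1), ih =>
      intro w hw
      rw [descWs] at hw
      rcases List.mem_cons.mp hw with h | h
      · omega
      · have := ih w h
        omega

lemma bLoop_eq (t p : List Char) : ∀ ws : List Nat, (∀ w ∈ ws, 2 ≤ w ∧ w ≤ t.length) →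
    bLoop t p (t.length : Int) (ws.map (fun i : Nat => (i : Int))) = firstHitsC t p ws := by
  intro ws
  induction ws with
  | nil => intro _; simp [bLoop, firstHitsC]
  | cons w rest ih =>
    intro h
    rw [List.map_cons, bLoop]
    have hw := h w List.mem_cons_self
    rw [bSegHits_eq t p w hw.1 hw.2, firstHitsC]
    by_cases hemp : hitsC t p w = []
    · rw [if_pos hemp, if_pos hemp, ih (fun v hv => h v (List.mem_cons_of_mem _ hv))]
    · rw [if_neg hemp, if_neg hemp]

theorem find_repeatable_segment2_spec : Claim_equal_find_repeatable_segment2 := by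
  intro text string _
  unfold Spec_find_repeatable_segment2 find_repeatable_segment2 find_repeatable_segment2_alt
  simp only [PySem.Chars.len_eq]
  rw [show ((text.toList.length : Int)) = ((text.toList.length : Nat) : Int) by norm_num]
  rw [show PySem.Int.floordiv ((text.toList.length : Nat) : Int) 2 = ((text.toList.length / 2 : Nat) : Int) from by exact_mod_cast PySem.Int.floordiv_natCast _ 2]
  rw [A_outer text.toList string.toList (text.toList.length / 2) le_rfl]
  rw [bRange_desc, bLoop_eq]
  · intro w hw
    have h := descWs_mem _ w hw
    exact ⟨h.1, le_trans h.2 (Nat.div_le_self _ _)⟩
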